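-- pv_equiv track=rewrite | github.com/stanislavkozlovski/python_exercises | hackerrank/101_hack_47/3.py | find_best_path_to_hoop
-- ===== SOURCE A (Python) =====
-- def find_best_path_to_hoop(s_x, s_y, hoop_x, hoop_y, tm):
--     # from collections import deque
--     # qq = deque()
--     # visited = set()
--     # visited.add((s_x, s_y))
--     # qq.append((s_x, s_y))
--     # prev = {(s_x, s_y): None}
--     # while len(qq) != 0:
--     #     s_x, s_y = qq.popleft()
--     #     for r_add, c_add in PATHS:
--     #         new_row = s_x + r_add
--     #         new_col = s_y = c_add
--     #         if 0 <= new_row < len(matrix) and 0 <= new_col < len(matrix[0]):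
--     #             if (new_row, new_col) not in visited:
--     #                 visited.add((new_row, new_col))
--     #                 qq.append((new_row, new_col))
--     #                 prev[(new_row, new_col)] = (s_x, s_y)
--     #                 if (new_row, new_col) == (hoop_x, hoop_y):
--     #                     break
--     #
--     # best_path = []
--     # while True:
--     #     best_path.append((hoop_x, hoop_y))
--     #     if prev[(hoop_x, hoop_y)] is None:
--     #         break
--     #     hoop_x, hoop_y = prev[(hoop_x, hoop_y)]
--     #
--     # start_time = 0
--     # best_path_baby = []
--     # for path in reversed(best_path):
--     #     x, y = path
--     #     best_path_baby.append((x, y, start_time))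
--     #     start_time += tm
--     best_path_baby = []
--     tm = 1
--     # if s_x != hoop_x and s_y != hoop_y:
--     #     raise Exception()
--     while s_x != hoop_x or s_y != hoop_y:
--         # if s_x != hoop_x and s_y != hoop_y:
--         #     raise Exception()
--         if s_x != hoop_x:
--             if hoop_x > s_x:
--                 s_x += 1
--             else:
--                 s_x -= 1
--         if s_y != hoop_y:
--             if hoop_y > s_y:
--                 s_y += 1
--             else:
--                 s_y -= 1
--         best_path_baby.append((s_x, s_y, tm))
--         tm += 1
--     return best_path_baby
-- ===== SOURCE B (Python) =====
-- def find_best_path_to_hoop(s_x, s_y, hoop_x, hoop_y, tm):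
--     # tm is ignored (as in the original); timestamps always start at 1
--     dx = hoop_x - s_x
--     dy = hoop_y - s_y
--     sx = (dx > 0) - (dx < 0)
--     sy = (dy > 0) - (dy < 0)
--     n = max(abs(dx), abs(dy))
--     return [(s_x + sx * min(i, abs(dx)), s_y + sy * min(i, abs(dy)), i)
--             for i in range(1, n + 1)]
-- ===== Notes on version B (the rewrite author's own statement) =====
-- stated objective: simpler
-- what changed: Replaces the incremental step-and-append while-loop with a closed-form per-index comprehension: element i is computed directly from the start point, per-axis signs and min(i, axis distance).
import Mathlib
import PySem

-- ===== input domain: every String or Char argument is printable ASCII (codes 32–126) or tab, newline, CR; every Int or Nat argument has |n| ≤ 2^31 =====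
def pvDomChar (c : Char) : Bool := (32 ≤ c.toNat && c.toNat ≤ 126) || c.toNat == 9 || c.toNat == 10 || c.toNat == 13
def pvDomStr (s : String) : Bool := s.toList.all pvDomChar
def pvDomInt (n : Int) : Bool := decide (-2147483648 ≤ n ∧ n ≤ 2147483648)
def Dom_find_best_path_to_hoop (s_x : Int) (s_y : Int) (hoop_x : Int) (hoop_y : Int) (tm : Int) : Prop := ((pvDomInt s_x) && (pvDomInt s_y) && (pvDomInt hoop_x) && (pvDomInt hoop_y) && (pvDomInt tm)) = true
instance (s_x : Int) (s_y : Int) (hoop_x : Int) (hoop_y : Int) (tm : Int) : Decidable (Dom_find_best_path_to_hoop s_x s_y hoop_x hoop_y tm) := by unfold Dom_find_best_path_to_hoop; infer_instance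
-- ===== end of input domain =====

-- B replaces A's incremental step-and-append while-loop by a closed-form per-index
-- construction (objective: simpler); the tm parameter is ignored exactly as in A.

-- ===== PORT A =====
-- one body of A's while-loop, per axis: step s one unit toward h if not yet there
def pvStepX (s h : Int) : Int := if s ≠ h then (if h > s then s + 1 else s - 1) else s

-- A's while-loop: state (s_x, s_y, tm), appending (s_x', s_y', tm) each iteration.
-- The fuel argument is only a totality guard: the wrapper passes the loop's exact
-- iteration count (the chebyshev distance), so the fuel branch is never the one that stops.
def pvLoopA (hoop_x hoop_y : Int) : Nat → Int → Int → Int → List (Int × Int × Int)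
  | 0, _, _, _ => []
  | fuel + 1, s_x, s_y, tm =>
    if s_x ≠ hoop_x ∨ s_y ≠ hoop_y then
      (pvStepX s_x hoop_x, pvStepX s_y hoop_y, tm) ::
        pvLoopA hoop_x hoop_y fuel (pvStepX s_x hoop_x) (pvStepX s_y hoop_y) (tm + 1)
    else []

def find_best_path_to_hoop (s_x : Int) (s_y : Int) (hoop_x : Int) (hoop_y : Int) (tm : Int) : List (Int × Int × Int) :=
  -- A rebinds tm = 1 before the loop; the parameter is never used
  pvLoopA hoop_x hoop_y (max (hoop_x - s_x).natAbs (hoop_y - s_y).natAbs) s_x s_y 1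

-- ===== PORT B =====
-- (dx > 0) - (dx < 0)
def pvSign (d : Int) : Int := (if d > 0 then (1:Int) else 0) - (if d < 0 then (1:Int) else 0)

def find_best_path_to_hoop_alt (s_x : Int) (s_y : Int) (hoop_x : Int) (hoop_y : Int) (tm : Int) : List (Int × Int × Int) :=
  let dx := hoop_x - s_x
  let dy := hoop_y - s_y
  let n : Nat := max dx.natAbs dy.natAbs
  (PySem.List.pyRange 1 ((n : Int) + 1) 1).map (fun i =>
    (s_x + pvSign dx * min i ((dx.natAbs : Int)),
     s_y + pvSign dy * min i ((dy.natAbs : Int)), i))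

-- ===== PRECONDITION & SPEC =====
def Spec_find_best_path_to_hoop (s_x : Int) (s_y : Int) (hoop_x : Int) (hoop_y : Int) (tm : Int) (out : List (Int × Int × Int)) : Prop := out = find_best_path_to_hoop_alt s_x s_y hoop_x hoop_y tm
instance (s_x : Int) (s_y : Int) (hoop_x : Int) (hoop_y : Int) (tm : Int) (out : List (Int × Int × Int)) : Decidable (Spec_find_best_path_to_hoop s_x s_y hoop_x hoop_y tm out) := by unfold Spec_find_best_path_to_hoop; infer_instance

-- ===== CLAIM (what is proved, stated in full; the proofs are below) =====
def Claim_equal_find_best_path_to_hoop : Prop := ∀ (s_x : Int) (s_y : Int) (hoop_x : Int) (hoop_y : Int) (tm : Int), Dom_find_best_path_to_hoop s_x s_y hoop_x hoop_y tm → Spec_find_best_path_to_hoop s_x s_y hoop_x hoop_y tm (find_best_path_to_hoop s_x s_y hoop_x hoop_y tm)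

-- ===== LEMMAS AND PROOFS =====

lemma coordHead (s h : Int) :
    pvStepX s h = s + pvSign (h - s) * min ((0:Int) + 1) (((h - s).natAbs : Int)) := by
  unfold pvStepX pvSign; split_ifs <;> omega

lemma coordStep (s h k : Int) (hk : 0 ≤ k) :
    pvStepX s h + pvSign (h - pvStepX s h) * min (k + 1) (((h - pvStepX s h).natAbs : Int))
      = s + pvSign (h - s) * min (k + 2) (((h - s).natAbs : Int)) := by
  unfold pvStepX pvSign; split_ifs <;> omega

lemma pvLoopA_eq (hx hy : Int) : ∀ (n : Nat), ∀ (sx sy t : Int),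
    max (hx - sx).natAbs (hy - sy).natAbs = n →
    pvLoopA hx hy n sx sy t = (List.range n).map (fun (k : Nat) =>
      (sx + pvSign (hx - sx) * min ((k : Int) + 1) (((hx - sx).natAbs : Int)),
       sy + pvSign (hy - sy) * min ((k : Int) + 1) (((hy - sy).natAbs : Int)),
       t + (k : Int))) := by
  intro n
  induction n with
  | zero =>
    intro sx sy t hn
    simp [pvLoopA]
  | succ n ih =>
    intro sx sy t hn
    have hne : sx ≠ hx ∨ sy ≠ hy := by omega
    rw [pvLoopA, if_pos hne]

    have hm : max (hx - pvStepX sx hx).natAbs (hy - pvStepX sy hy).natAbs = n := by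
      have h := hn
      simp only [pvStepX]
      rcases hne with h' | h' <;> split_ifs <;> omega
    rw [ih _ _ _ hm, List.range_succ_eq_map, List.map_cons, List.map_map]
    refine List.cons_eq_cons.mpr ⟨?_, ?_⟩
    · rw [coordHead sx hx, coordHead sy hy]; simp
    · refine List.map_congr_left fun k _ => ?_
      simp only [Function.comp]
      have hcx := coordStep sx hx (k : Int) (by positivity)
      have hcy := coordStep sy hy (k : Int) (by positivity)
      refine Prod.ext ?_ (Prod.ext ?_ ?_)
      · push_cast at hcx ⊢
        rw [show ((k : Int) + 1 + 1) = (k : Int) + 2 by ring]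
        exact hcx
      · push_cast at hcy ⊢
        rw [show ((k : Int) + 1 + 1) = (k : Int) + 2 by ring]
        exact hcy
      · push_cast; ring

-- ===== VERDICT (by name: the statement is the Claim_ definition above) =====
theorem find_best_path_to_hoop_spec : Claim_equal_find_best_path_to_hoop := by
  intro sx sy hx hy tm _
  unfold Spec_find_best_path_to_hoop find_best_path_to_hoop find_best_path_to_hoop_alt
  simp only [PySem.List.pyRange_one]
  have hlen : (((max (hx - sx).natAbs (hy - sy).natAbs : Nat) : Int) + 1 - 1).toNat
      = max (hx - sx).natAbs (hy - sy).natAbs := by omega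
  rw [hlen, pvLoopA_eq hx hy _ sx sy 1 rfl, List.map_map]
  refine List.map_congr_left fun k _ => ?_
  simp only [Function.comp]
  refine Prod.ext ?_ (Prod.ext ?_ ?_) <;> simp [add_comm]
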